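-- pv_equiv track=rewrite | github.com/SiliconJackets/CaC_Spring26 | design_root/sim/behav/vcdview_tool.py | compute_phase_error
-- ===== SOURCE A (Python) =====
-- def compute_phase_error(edges_ref, edges_fb):
--     errors = []
--     times = []
--
--     for e in edges_fb:
--         # find closest reference edge
--         closest = min(edges_ref, key=lambda x: abs(x - e))
--         error = e - closest
--         times.append(e)
--         errors.append(error)
--
--     return times, errors
-- ===== SOURCE B (Python) =====
-- from bisect import bisect_left
--
-- def compute_phase_error(edges_ref, edges_fb):
--     vals = sorted(set(edges_ref))
--     errors = []
--     for e in edges_fb: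
--         i = bisect_left(vals, e)
--         if i == 0:
--             closest = vals[0]
--         elif i == len(vals):
--             closest = vals[i - 1]
--         else:
--             lo, hi = vals[i - 1], vals[i]
--             if e - lo < hi - e:
--                 closest = lo
--             elif hi - e < e - lo:
--                 closest = hi
--             else:
--                 closest = lo if edges_ref.index(lo) < edges_ref.index(hi) else hi
--         errors.append(e - closest)
--     return list(edges_fb), errors
-- ===== Notes on version B (the rewrite author's own statement) =====
-- stated objective: faster
-- what changed: Replaced A's per-feedback-edge linear min-scan over edges_ref with one initial sort of the distinct reference edges plus a bisect_left binary search per feedback edge, breaking exact distance ties like Python's min by first occurrence in edges_ref.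
import Mathlib
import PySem

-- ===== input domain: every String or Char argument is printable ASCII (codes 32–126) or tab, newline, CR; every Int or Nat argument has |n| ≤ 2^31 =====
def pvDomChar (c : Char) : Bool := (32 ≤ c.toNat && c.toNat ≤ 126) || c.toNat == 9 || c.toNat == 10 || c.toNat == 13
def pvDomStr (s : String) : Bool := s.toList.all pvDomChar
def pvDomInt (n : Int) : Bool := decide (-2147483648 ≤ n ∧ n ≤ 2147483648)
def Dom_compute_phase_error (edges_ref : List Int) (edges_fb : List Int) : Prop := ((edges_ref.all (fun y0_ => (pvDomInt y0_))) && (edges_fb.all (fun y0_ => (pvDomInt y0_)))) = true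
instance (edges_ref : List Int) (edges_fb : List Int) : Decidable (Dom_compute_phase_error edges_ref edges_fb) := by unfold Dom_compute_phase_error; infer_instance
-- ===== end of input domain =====

-- B replaces A's per-feedback-edge linear min-scan over edges_ref by sorting the distinct
-- reference edges once and binary-searching (bisect_left) each feedback edge; an exact
-- distance tie between the two neighbours is broken like Python's min (first occurrence
-- in edges_ref wins).

-- ===== PORT A =====
def compute_phase_error (edges_ref : List Int) (edges_fb : List Int) : List Int × List Int :=
  edges_fb.foldl (fun st e =>
    match PySem.List.min? edges_ref (fun x => |x - e|) with
    | some closest => (st.1 ++ [e], st.2 ++ [e - closest])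
    | none => st)   -- unreachable inside Pre_: Python min raises ValueError on an empty edges_ref
    ([], [])

-- ===== PORT B =====
def compute_phase_error_alt (edges_ref : List Int) (edges_fb : List Int) : List Int × List Int :=
  let vals := PySem.List.sorted (PySem.Set.ofList edges_ref) (fun x => x)
  let errors := edges_fb.foldl (fun es e =>
    let i := PySem.List.bisectLeft vals e
    let closest :=
      if i = 0 then vals.getD 0 0          -- vals[0]; in range inside Pre_
      else if i = vals.length then vals.getD (i - 1) 0
      else
        let lo := vals.getD (i - 1) 0
        let hi := vals.getD i 0
        if e - lo < hi - e then lo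
        else if hi - e < e - lo then hi
        -- exact tie: lo and hi are both members of edges_ref, so .index returns
        else if (PySem.List.index? edges_ref lo).getD 0 < (PySem.List.index? edges_ref hi).getD 0 then lo
        else hi
    es ++ [e - closest]) []
  (edges_fb, errors)

-- ===== PRECONDITION & SPEC =====
-- Pre_ excludes only inputs with a nonempty edges_fb and an empty edges_ref, on which
-- A raises ValueError (min of an empty sequence).
def Pre_compute_phase_error (edges_ref : List Int) (edges_fb : List Int) : Prop :=
  edges_fb = [] ∨ edges_ref ≠ []
instance (edges_ref : List Int) (edges_fb : List Int) : Decidable (Pre_compute_phase_error edges_ref edges_fb) := by unfold Pre_compute_phase_error; infer_instance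

def pvWitness_compute_phase_error : List Int × List Int := ([10, 0, 7], [1, 9, -3])

def Spec_compute_phase_error (edges_ref : List Int) (edges_fb : List Int) (out : List Int × List Int) : Prop := out = compute_phase_error_alt edges_ref edges_fb
instance (edges_ref : List Int) (edges_fb : List Int) (out : List Int × List Int) : Decidable (Spec_compute_phase_error edges_ref edges_fb out) := by unfold Spec_compute_phase_error; infer_instance

-- ===== CLAIM (what is proved, stated in full; the proofs are below) =====
def Claim_equal_compute_phase_error : Prop := ∀ (edges_ref : List Int) (edges_fb : List Int), Dom_compute_phase_error edges_ref edges_fb → Pre_compute_phase_error edges_ref edges_fb → Spec_compute_phase_error edges_ref edges_fb (compute_phase_error edges_ref edges_fb)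

-- ===== LEMMAS AND PROOFS =====

-- B's per-edge closest reference value (the body of B's loop, as a function of e).
def bClosest (edges_ref : List Int) (e : Int) : Int :=
  let vals := PySem.List.sorted (PySem.Set.ofList edges_ref) (fun x => x)
  let i := PySem.List.bisectLeft vals e
  if i = 0 then vals.getD 0 0
  else if i = vals.length then vals.getD (i - 1) 0
  else
    let lo := vals.getD (i - 1) 0
    let hi := vals.getD i 0
    if e - lo < hi - e then lo
    else if hi - e < e - lo then hi
    else if (PySem.List.index? edges_ref lo).getD 0 < (PySem.List.index? edges_ref hi).getD 0 then lo
    else hi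

lemma alt_eq (edges_ref edges_fb : List Int) :
    compute_phase_error_alt edges_ref edges_fb
      = (edges_fb, edges_fb.map (fun e => e - bClosest edges_ref e)) := by
  unfold compute_phase_error_alt
  have := PySem.List.foldl_append_singleton_eq_map
    (fun e => e - bClosest edges_ref e) edges_fb []
  simp only [List.nil_append] at this
  simpa [bClosest] using congrArg (fun l => (edges_fb, l)) this

lemma a_eq (edges_ref : List Int) (href : edges_ref ≠ []) (edges_fb : List Int) :
    compute_phase_error edges_ref edges_fb
      = (edges_fb, edges_fb.map (fun e =>
          e - (PySem.List.min? edges_ref (fun x => |x - e|)).getD 0)) := by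
  unfold compute_phase_error
  suffices h : ∀ (fb : List Int) (acc : List Int × List Int),
      fb.foldl (fun st e =>
        match PySem.List.min? edges_ref (fun x => |x - e|) with
        | some closest => (st.1 ++ [e], st.2 ++ [e - closest])
        | none => st) acc
      = (acc.1 ++ fb, acc.2 ++ fb.map (fun e =>
          e - (PySem.List.min? edges_ref (fun x => |x - e|)).getD 0)) by
    simpa using h edges_fb ([], [])
  intro fb
  induction fb with
  | nil => intro acc; simp
  | cons e t ih =>
    intro acc
    obtain ⟨m, hm⟩ : ∃ m, PySem.List.min? edges_ref (fun x => |x - e|) = some m := by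
      cases h : PySem.List.min? edges_ref (fun x => |x - e|) with
      | none => exact absurd ((PySem.List.min?_eq_none_iff _ _).mp h) href
      | some m => exact ⟨m, rfl⟩
    simp [hm, ih]

-- .index of a member, through idxOf? .getD.
lemma index_getD_of_mem (l : List Int) (v : Int) (h : v ∈ l) :
    (PySem.List.index? l v).getD 0 = l.idxOf v := by
  unfold PySem.List.index?
  cases hh : List.idxOf? v l with
  | none => exact absurd ((List.idxOf?_eq_none_iff).mp hh) (by simpa using h)
  | some k => simp [List.idxOf_eq_getD_idxOf?, hh]

-- Python min returns the FIRST minimum: everything before it is strictly larger,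
-- everything after it is at least as large.
lemma min?_cons_decomp (key : Int → Int) (t : List Int) : ∀ (a m : Int),
    PySem.List.min? (a :: t) key = some m →
    ∃ l1 l2, a :: t = l1 ++ m :: l2 ∧
      (∀ y ∈ l1, key m < key y) ∧ (∀ y ∈ l2, key m ≤ key y) := by
  induction t with
  | nil =>
    intro a m h
    have : a = m := by simpa [PySem.List.min?] using h
    subst this
    exact ⟨[], [], rfl, by simp, by simp⟩
  | cons x t ih =>
    intro a m h
    by_cases hx : key x < key a
    · have step : PySem.List.min? (x :: t) key = some m := by
        simpa [PySem.List.min?, hx] using h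
      obtain ⟨l1, l2, hsp, hpre, hsuf⟩ := ih x m step
      have hmx : key m ≤ key x := by
        cases l1 with
        | nil => simp at hsp; rw [hsp.1]
        | cons b l1' =>
          have hb : b = x := by have := congrArg (fun l => l.headI) hsp; simpa using this.symm
          exact le_of_lt (hpre x (hb ▸ List.mem_cons_self))
      refine ⟨a :: l1, l2, by rw [List.cons_append, ← hsp], ?_, hsuf⟩
      intro y hy
      rcases List.mem_cons.mp hy with rfl | hy
      · exact lt_of_le_of_lt hmx hx
      · exact hpre y hy
    · have step : PySem.List.min? (a :: t) key = some m := by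
        simpa [PySem.List.min?, hx] using h
      rw [not_lt] at hx
      obtain ⟨l1, l2, hsp, hpre, hsuf⟩ := ih a m step
      cases l1 with
      | nil =>
        simp only [List.nil_append] at hsp
        obtain ⟨rfl, rfl⟩ : a = m ∧ t = l2 := by
          constructor
          · simpa using congrArg (fun l => l.headI) hsp
          · simpa using congrArg (fun l => l.tail) hsp
        refine ⟨[], x :: t, rfl, by simp, ?_⟩
        intro y hy
        rcases List.mem_cons.mp hy with rfl | hy
        · exact hx
        · exact hsuf y hy
      | cons b l1' =>
        have hb : b = a := by have := congrArg (fun l => l.headI) hsp; simpa using this.symm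
        subst hb
        have ht : t = l1' ++ m :: l2 := by simpa using congrArg (fun l => l.tail) hsp
        have hma : key m < key b := hpre b List.mem_cons_self
        refine ⟨b :: x :: l1', l2, by rw [ht]; rfl, ?_, hsuf⟩
        intro y hy
        rcases List.mem_cons.mp hy with rfl | hy
        · exact hma
        · rcases List.mem_cons.mp hy with rfl | hy
          · exact lt_of_lt_of_le hma hx
          · exact hpre y (List.mem_cons_of_mem _ hy)

-- Python min's first-minimum characterisation.
lemma min?_decomp (key : Int → Int) (xs : List Int) (m : Int)
    (h : PySem.List.min? xs key = some m) :
    ∃ l1 l2, xs = l1 ++ m :: l2 ∧ (∀ y ∈ l1, key m < key y) ∧ (∀ y ∈ l2, key m ≤ key y) := by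
  cases xs with
  | nil => simp [PySem.List.min?] at h
  | cons x t => exact min?_cons_decomp key t x m h

-- B's closest is a minimizer of |x - e| over edges_ref whose first occurrence in
-- edges_ref is no later than that of any other minimizer.
lemma bClosest_spec (edges_ref : List Int) (e : Int) (href : edges_ref ≠ []) :
    bClosest edges_ref e ∈ edges_ref ∧
      (∀ y ∈ edges_ref, |bClosest edges_ref e - e| ≤ |y - e|) ∧
      (∀ y ∈ edges_ref, |y - e| = |bClosest edges_ref e - e| →
        edges_ref.idxOf (bClosest edges_ref e) ≤ edges_ref.idxOf y) := by
  set vals := PySem.List.sorted (PySem.Set.ofList edges_ref) (fun x => x) with hvals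
  have hmem_iff : ∀ y : Int, y ∈ vals ↔ y ∈ edges_ref := by
    intro y
    rw [hvals, PySem.List.mem_sorted, PySem.Set.mem_ofList]
  have hne : vals ≠ [] := by
    obtain ⟨x, hx⟩ := List.exists_mem_of_ne_nil _ href
    intro h
    exact absurd ((hmem_iff x).mpr hx) (by simp [h])
  have hlen : 0 < vals.length := List.length_pos_iff.mpr hne
  have hpw : List.Pairwise (fun a b => a ≤ b) vals := by
    have := PySem.List.sorted_ofList_pairwise_lt (edges_ref)
    exact List.Pairwise.imp le_of_lt (hvals ▸ this)
  obtain ⟨hile, hlt, hge⟩ := PySem.List.bisectLeft_spec vals e hpw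
  set i := PySem.List.bisectLeft vals e with hi
  have hmono : ∀ (p q : ℕ) (hpq : p ≤ q) (hq : q < vals.length),
      vals[p]'(lt_of_le_of_lt hpq hq) ≤ vals[q] := by
    intro p q hpq hq
    exact PySem.List.sorted_id_getElem_mono (PySem.Set.ofList edges_ref) hpq hq
  have hmem : ∀ (j : ℕ) (hj : j < vals.length), vals[j] ∈ edges_ref := by
    intro j hj
    exact (hmem_iff _).mp (List.getElem_mem hj)
  have hidx : ∀ y ∈ edges_ref, ∃ (j : ℕ) (hj : j < vals.length), vals[j] = y := by
    intro y hy
    exact List.mem_iff_getElem.mp ((hmem_iff y).mpr hy)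
  have hbc : bClosest edges_ref e =
      (if i = 0 then vals.getD 0 0
       else if i = vals.length then vals.getD (i - 1) 0
       else if e - vals.getD (i - 1) 0 < vals.getD i 0 - e then vals.getD (i - 1) 0
       else if vals.getD i 0 - e < e - vals.getD (i - 1) 0 then vals.getD i 0
       else if (PySem.List.index? edges_ref (vals.getD (i - 1) 0)).getD 0
               < (PySem.List.index? edges_ref (vals.getD i 0)).getD 0 then vals.getD (i - 1) 0
       else vals.getD i 0) := by
    simp only [bClosest, ← hvals, ← hi]
  by_cases h0 : i = 0
  · -- every reference edge is ≥ e; the closest is the smallest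
    have hc : bClosest edges_ref e = vals[0] := by
      rw [hbc, if_pos h0, List.getD_eq_getElem _ _ hlen]
    rw [hc]
    refine ⟨hmem 0 hlen, ?_, ?_⟩ <;> intro y hy <;> obtain ⟨j, hj, hjy⟩ := hidx y hy
    · have h1 : e ≤ vals[0] := hge 0 hlen (h0 ▸ Nat.le_refl 0)
      have h2 : e ≤ vals[j] := hge j hj (h0 ▸ Nat.zero_le j)
      have h3 : vals[0] ≤ vals[j] := hmono 0 j (Nat.zero_le j) hj
      rw [← hjy]
      rcases abs_cases (vals[0] - e) with ⟨ha, _⟩ | ⟨ha, _⟩ <;>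
        rcases abs_cases (vals[j] - e) with ⟨hb, _⟩ | ⟨hb, _⟩ <;> omega
    · intro hkey
      have h1 : e ≤ vals[0] := hge 0 hlen (h0 ▸ Nat.le_refl 0)
      have h2 : e ≤ vals[j] := hge j hj (h0 ▸ Nat.zero_le j)
      have h3 : vals[0] ≤ vals[j] := hmono 0 j (Nat.zero_le j) hj
      have hyc : y = vals[0] := by
        rw [← hjy] at hkey ⊢
        rcases abs_cases (vals[0] - e) with ⟨ha, _⟩ | ⟨ha, _⟩ <;>
          rcases abs_cases (vals[j] - e) with ⟨hb, _⟩ | ⟨hb, _⟩ <;> omega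
      rw [hyc]
  · by_cases hL : i = vals.length
    · -- every reference edge is < e; the closest is the largest
      have hi1 : i - 1 < vals.length := by omega
      have hc : bClosest edges_ref e = vals[i-1] := by
        rw [hbc, if_neg h0, if_pos hL, List.getD_eq_getElem _ _ hi1]
      rw [hc]
      refine ⟨hmem _ hi1, ?_, ?_⟩ <;> intro y hy <;> obtain ⟨j, hj, hjy⟩ := hidx y hy
      · have h1 : vals[i-1] < e := hlt (i-1) hi1 (by omega)
        have h2 : vals[j] < e := hlt j hj (by omega)
        have h3 : vals[j] ≤ vals[i-1] := hmono j (i-1) (by omega) hi1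
        rw [← hjy]
        rcases abs_cases (vals[i-1] - e) with ⟨ha, _⟩ | ⟨ha, _⟩ <;>
          rcases abs_cases (vals[j] - e) with ⟨hb, _⟩ | ⟨hb, _⟩ <;> omega
      · intro hkey
        have h1 : vals[i-1] < e := hlt (i-1) hi1 (by omega)
        have h2 : vals[j] < e := hlt j hj (by omega)
        have h3 : vals[j] ≤ vals[i-1] := hmono j (i-1) (by omega) hi1
        have hyc : y = vals[i-1] := by
          rw [← hjy] at hkey ⊢
          rcases abs_cases (vals[i-1] - e) with ⟨ha, _⟩ | ⟨ha, _⟩ <;>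
            rcases abs_cases (vals[j] - e) with ⟨hb, _⟩ | ⟨hb, _⟩ <;> omega
        rw [hyc]
    · -- vals[i-1] < e ≤ vals[i]: the closest is one of the two neighbours
      have hiL : i < vals.length := lt_of_le_of_ne hile hL
      have hi1 : i - 1 < vals.length := by omega
      have hlo : vals[i-1] < e := hlt (i-1) hi1 (by omega)
      have hhi : e ≤ vals[i] := hge i hiL (Nat.le_refl i)
      -- position of an arbitrary reference edge relative to the two neighbours
      have hsplit : ∀ (j : ℕ) (hj : j < vals.length),
          (vals[j] < e ∧ vals[j] ≤ vals[i-1]) ∨ (e ≤ vals[j] ∧ vals[i] ≤ vals[j]) := by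
        intro j hj
        by_cases hji : j < i
        · exact Or.inl ⟨hlt j hj hji, hmono j (i-1) (by omega) hi1⟩
        · exact Or.inr ⟨hge j hj (by omega), hmono i j (by omega) hj⟩
      have hc : bClosest edges_ref e =
          (if e - vals[i-1] < vals[i] - e then vals[i-1]
           else if vals[i] - e < e - vals[i-1] then vals[i]
           else if (PySem.List.index? edges_ref vals[i-1]).getD 0
                   < (PySem.List.index? edges_ref vals[i]).getD 0 then vals[i-1]
           else vals[i]) := by
        rw [hbc, if_neg h0, if_neg hL, List.getD_eq_getElem _ _ hi1,
          List.getD_eq_getElem _ _ hiL]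
      by_cases hd1 : e - vals[i-1] < vals[i] - e
      · -- strictly nearer lower neighbour
        have hc' : bClosest edges_ref e = vals[i-1] := by rw [hc, if_pos hd1]
        rw [hc']
        refine ⟨hmem _ hi1, ?_, ?_⟩ <;> intro y hy <;> obtain ⟨j, hj, hjy⟩ := hidx y hy
        · rw [← hjy]
          rcases hsplit j hj with ⟨h2, h3⟩ | ⟨h2, h3⟩ <;>
          · rcases abs_cases (vals[i-1] - e) with ⟨ha, _⟩ | ⟨ha, _⟩ <;>
              rcases abs_cases (vals[j] - e) with ⟨hb, _⟩ | ⟨hb, _⟩ <;> omega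
        · intro hkey
          have hyc : y = vals[i-1] := by
            rw [← hjy] at hkey ⊢
            rcases hsplit j hj with ⟨h2, h3⟩ | ⟨h2, h3⟩ <;>
            · rcases abs_cases (vals[i-1] - e) with ⟨ha, _⟩ | ⟨ha, _⟩ <;>
                rcases abs_cases (vals[j] - e) with ⟨hb, _⟩ | ⟨hb, _⟩ <;> omega
          rw [hyc]
      · by_cases hd2 : vals[i] - e < e - vals[i-1]
        · -- strictly nearer upper neighbour
          have hc' : bClosest edges_ref e = vals[i] := by rw [hc, if_neg hd1, if_pos hd2]
          rw [hc']
          refine ⟨hmem _ hiL, ?_, ?_⟩ <;> intro y hy <;> obtain ⟨j, hj, hjy⟩ := hidx y hy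
          · rw [← hjy]
            rcases hsplit j hj with ⟨h2, h3⟩ | ⟨h2, h3⟩ <;>
            · rcases abs_cases (vals[i] - e) with ⟨ha, _⟩ | ⟨ha, _⟩ <;>
                rcases abs_cases (vals[j] - e) with ⟨hb, _⟩ | ⟨hb, _⟩ <;> omega
          · intro hkey
            have hyc : y = vals[i] := by
              rw [← hjy] at hkey ⊢
              rcases hsplit j hj with ⟨h2, h3⟩ | ⟨h2, h3⟩ <;>
              · rcases abs_cases (vals[i] - e) with ⟨ha, _⟩ | ⟨ha, _⟩ <;>
                  rcases abs_cases (vals[j] - e) with ⟨hb, _⟩ | ⟨hb, _⟩ <;> omega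
            rw [hyc]
        · -- exact tie: both neighbours at equal distance; first occurrence wins
          have hdeq : e - vals[i-1] = vals[i] - e := by omega
          have hlomem : vals[i-1] ∈ edges_ref := hmem _ hi1
          have hhimem : vals[i] ∈ edges_ref := hmem _ hiL
          have hc' : bClosest edges_ref e =
              (if edges_ref.idxOf vals[i-1] < edges_ref.idxOf vals[i] then vals[i-1]
               else vals[i]) := by
            rw [hc, if_neg hd1, if_neg hd2,
              index_getD_of_mem _ _ hlomem, index_getD_of_mem _ _ hhimem]
          have hminboth : ∀ y ∈ edges_ref,
              |vals[i-1] - e| ≤ |y - e| ∧ |vals[i] - e| ≤ |y - e| := by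
            intro y hy
            obtain ⟨j, hj, hjy⟩ := hidx y hy
            rw [← hjy]
            constructor <;>
            · rcases hsplit j hj with ⟨h2, h3⟩ | ⟨h2, h3⟩ <;>
              · rcases abs_cases (vals[i-1] - e) with ⟨ha, _⟩ | ⟨ha, _⟩ <;>
                  rcases abs_cases (vals[i] - e) with ⟨hd, _⟩ | ⟨hd, _⟩ <;>
                  rcases abs_cases (vals[j] - e) with ⟨hb, _⟩ | ⟨hb, _⟩ <;> omega
          have htieboth : ∀ y ∈ edges_ref, |y - e| = |vals[i-1] - e| →
              y = vals[i-1] ∨ y = vals[i] := by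
            intro y hy hkey
            obtain ⟨j, hj, hjy⟩ := hidx y hy
            rw [← hjy] at hkey ⊢
            rcases hsplit j hj with ⟨h2, h3⟩ | ⟨h2, h3⟩
            · left
              rcases abs_cases (vals[i-1] - e) with ⟨ha, _⟩ | ⟨ha, _⟩ <;>
                rcases abs_cases (vals[j] - e) with ⟨hb, _⟩ | ⟨hb, _⟩ <;> omega
            · right
              rcases abs_cases (vals[i-1] - e) with ⟨ha, _⟩ | ⟨ha, _⟩ <;>
                rcases abs_cases (vals[j] - e) with ⟨hb, _⟩ | ⟨hb, _⟩ <;> omega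
          have habs_eq : |vals[i-1] - e| = |vals[i] - e| := by
            rcases abs_cases (vals[i-1] - e) with ⟨ha, _⟩ | ⟨ha, _⟩ <;>
              rcases abs_cases (vals[i] - e) with ⟨hd, _⟩ | ⟨hd, _⟩ <;> omega
          rw [hc']
          split
          · next hidxlt =>
            refine ⟨hlomem, fun y hy => (hminboth y hy).1, ?_⟩
            intro y hy hkey
            rcases htieboth y hy hkey with rfl | rfl
            · exact Nat.le_refl _
            · exact Nat.le_of_lt hidxlt
          · next hidxge =>
            refine ⟨hhimem, fun y hy => (hminboth y hy).2, ?_⟩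
            intro y hy hkey
            rcases htieboth y hy (habs_eq ▸ hkey) with rfl | rfl
            · omega
            · exact Nat.le_refl _

-- ===== VERDICT (by name: the statement is the Claim_ definition above) =====
theorem compute_phase_error_spec : Claim_equal_compute_phase_error := by
  intro edges_ref edges_fb _ hpre
  unfold Spec_compute_phase_error
  rcases hpre with hfb | href
  · subst hfb
    simp [compute_phase_error, alt_eq]
  · rw [a_eq edges_ref href, alt_eq]
    refine congrArg _ (List.map_congr_left ?_)
    intro e he
    obtain ⟨m, hm⟩ : ∃ m, PySem.List.min? edges_ref (fun x => |x - e|) = some m := by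
      cases h : PySem.List.min? edges_ref (fun x => |x - e|) with
      | none => exact absurd ((PySem.List.min?_eq_none_iff _ _).mp h) href
      | some m => exact ⟨m, rfl⟩
    rw [hm]
    obtain ⟨hcmem, hcmin, hctie⟩ := bClosest_spec edges_ref e href
    obtain ⟨l1, l2, hsp, hpre1, hsuf⟩ := min?_decomp (fun x => |x - e|) edges_ref m hm
    set c := bClosest edges_ref e with hcdef
    have hmmem : m ∈ edges_ref := by rw [hsp]; simp
    have hmmin : ∀ y ∈ edges_ref, |m - e| ≤ |y - e| := by
      intro y hy
      rw [hsp] at hy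
      rcases List.mem_append.mp hy with hy | hy
      · exact le_of_lt (hpre1 y hy)
      · rcases List.mem_cons.mp hy with rfl | hy
        · exact le_refl _
        · exact hsuf y hy
    have hkeyeq : |c - e| = |m - e| :=
      le_antisymm (hcmin m hmmem) (hmmin c hcmem)
    have hcnotl1 : c ∉ l1 := fun hc => absurd (hpre1 c hc) (by rw [hkeyeq]; exact lt_irrefl _)
    have hmnotl1 : m ∉ l1 := fun hmm => absurd (hpre1 m hmm) (lt_irrefl _)
    have hidxm : edges_ref.idxOf m = l1.length := by
      rw [hsp, List.idxOf_append_of_notMem hmnotl1, List.idxOf_cons_self, Nat.add_zero]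
    have hidxc : edges_ref.idxOf c = l1.length + (m :: l2).idxOf c := by
      rw [hsp, List.idxOf_append_of_notMem hcnotl1]
    have hle : edges_ref.idxOf c ≤ edges_ref.idxOf m := hctie m hmmem hkeyeq.symm
    have hzero : (m :: l2).idxOf c = 0 := by omega
    have : m = c := by
      by_contra hne
      rw [List.idxOf_cons] at hzero
      simp only [Bool.cond_eq_ite, beq_iff_eq, if_neg hne] at hzero
      omega
    simp [this]
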